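-- pv_equiv track=rewrite | github.com/catherhuang/Sephora_rating_review_analysis | final_scrapetool_functions.py | star_rating_distribution
-- ===== SOURCE A (Python) =====
-- def star_rating_distribution(review_distribution):
--     """clarify distribution of the number of stars for rating
--         review distribution is a list from, starting w lowest star to highest star"""
--     star_1=0
--     star_2=0
--     star_3=0
--     star_4=0
--     star_5=0
--     for i in review_distribution:
--         if i['RatingValue']==1:
--             star_1+=i['Count']
--         elif i['RatingValue']==2:
--             star_2+=i['Count']
--         elif i['RatingValue']==3:
--             star_3+=i['Count']
--         elif i['RatingValue']==4:
--             star_4+=i['Count']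
--         elif i['RatingValue']==5:
--             star_5+=i['Count']
--     star_distribution=[star_1, star_2, star_3 , star_4, star_5]
--     return star_distribution
-- ===== SOURCE B (Python) =====
-- def star_rating_distribution(review_distribution):
--     """clarify distribution of the number of stars for rating
--         review distribution is a list from, starting w lowest star to highest star"""
--     return [sum(i['Count'] for i in review_distribution if i['RatingValue'] == star)
--             for star in range(1, 6)]
-- ===== Notes on version B (the rewrite author's own statement) =====
-- stated objective: simpler
-- what changed: Replaces A's single stateful pass over five named counters and a five-way elif chain by five independent staged passes: for each star bucket 1..5 a separate filtered sum, with no mutable accumulator state at all.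
import Mathlib
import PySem

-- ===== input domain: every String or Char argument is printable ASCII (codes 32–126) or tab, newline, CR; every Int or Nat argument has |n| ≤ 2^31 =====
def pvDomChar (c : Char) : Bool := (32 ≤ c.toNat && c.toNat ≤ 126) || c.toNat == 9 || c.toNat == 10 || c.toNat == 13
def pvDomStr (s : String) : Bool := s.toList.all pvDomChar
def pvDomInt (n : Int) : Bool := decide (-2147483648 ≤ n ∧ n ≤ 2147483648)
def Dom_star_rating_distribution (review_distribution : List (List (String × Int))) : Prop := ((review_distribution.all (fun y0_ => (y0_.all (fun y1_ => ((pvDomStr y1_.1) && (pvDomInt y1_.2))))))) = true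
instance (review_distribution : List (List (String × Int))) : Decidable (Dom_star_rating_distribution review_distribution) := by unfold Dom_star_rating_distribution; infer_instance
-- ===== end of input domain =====

-- B replaces A's single stateful five-counter pass by five independent staged filtered sums,
-- one per star bucket (objective: simpler; not faster).


-- first-match lookup in an association-list dict (Python's i[key]; a missing key is a KeyError, excluded by Pre_)
def pvLookup (d : List (String × Int)) (k : String) : Int :=
  ((d.find? (fun p => p.1 == k)).map (·.2)).getD 0

-- ===== PORT A =====
-- A's loop body: the five-way elif chain over the five counters
def pvStepA (s : Int × Int × Int × Int × Int) (i : List (String × Int)) : Int × Int × Int × Int × Int :=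
  let rv := pvLookup i "RatingValue"
  if rv == 1 then (s.1 + pvLookup i "Count", s.2.1, s.2.2.1, s.2.2.2.1, s.2.2.2.2)
  else if rv == 2 then (s.1, s.2.1 + pvLookup i "Count", s.2.2.1, s.2.2.2.1, s.2.2.2.2)
  else if rv == 3 then (s.1, s.2.1, s.2.2.1 + pvLookup i "Count", s.2.2.2.1, s.2.2.2.2)
  else if rv == 4 then (s.1, s.2.1, s.2.2.1, s.2.2.2.1 + pvLookup i "Count", s.2.2.2.2)
  else if rv == 5 then (s.1, s.2.1, s.2.2.1, s.2.2.2.1, s.2.2.2.2 + pvLookup i "Count")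
  else s

def star_rating_distribution (review_distribution : List (List (String × Int))) : List Int :=
  let s := review_distribution.foldl pvStepA (0, 0, 0, 0, 0)
  [s.1, s.2.1, s.2.2.1, s.2.2.2.1, s.2.2.2.2]

-- ===== PORT B =====
-- sum(i['Count'] for i in review_distribution if i['RatingValue'] == star)
def pvBucket (review_distribution : List (List (String × Int))) (star : Int) : Int :=
  ((review_distribution.filter (fun i => pvLookup i "RatingValue" == star)).map
    (fun i => pvLookup i "Count")).sum

def star_rating_distribution_alt (review_distribution : List (List (String × Int))) : List Int :=
  (PySem.List.pyRange 1 6 1).map (pvBucket review_distribution)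

-- ===== PRECONDITION & SPEC =====
-- Pre_ excludes exactly the inputs where Python A raises KeyError (and B raises identically):
-- an entry without 'RatingValue', or an entry whose rating is 1..5 without 'Count'.
def Pre_star_rating_distribution (review_distribution : List (List (String × Int))) : Prop :=
  ∀ i ∈ review_distribution,
    (i.find? (fun p => p.1 == "RatingValue")).isSome ∧
    (pvLookup i "RatingValue" ∈ ([1, 2, 3, 4, 5] : List Int) →
      (i.find? (fun p => p.1 == "Count")).isSome)
instance (review_distribution : List (List (String × Int))) : Decidable (Pre_star_rating_distribution review_distribution) := by unfold Pre_star_rating_distribution; infer_instance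
def pvWitness_star_rating_distribution : (List (List (String × Int))) :=
  [[("RatingValue", 1), ("Count", 3)], [("RatingValue", 5), ("Count", 2)]]
def Spec_star_rating_distribution (review_distribution : List (List (String × Int))) (out : List Int) : Prop := out = star_rating_distribution_alt review_distribution
instance (review_distribution : List (List (String × Int))) (out : List Int) : Decidable (Spec_star_rating_distribution review_distribution out) := by unfold Spec_star_rating_distribution; infer_instance

-- ===== CLAIM (what is proved, stated in full; the proofs are below) =====
def Claim_equal_star_rating_distribution : Prop := ∀ (review_distribution : List (List (String × Int))), Dom_star_rating_distribution review_distribution → Pre_star_rating_distribution review_distribution → Spec_star_rating_distribution review_distribution (star_rating_distribution review_distribution)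

-- ===== LEMMAS AND PROOFS =====

-- A's fold from any start equals the start plus the five per-bucket filtered sums
theorem pv_fold (rd : List (List (String × Int))) :
    ∀ (s1 s2 s3 s4 s5 : Int),
      rd.foldl pvStepA (s1, s2, s3, s4, s5) =
        (s1 + pvBucket rd 1, s2 + pvBucket rd 2, s3 + pvBucket rd 3,
         s4 + pvBucket rd 4, s5 + pvBucket rd 5) := by
  induction rd with
  | nil => intro s1 s2 s3 s4 s5; simp [pvBucket]
  | cons i rest ih =>
    intro s1 s2 s3 s4 s5
    simp only [List.foldl_cons, pvStepA, pvBucket, List.filter_cons]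
    split_ifs with h1 h2 h3 h4 h5 <;>
      simp_all [pvBucket, add_assoc]

-- ===== VERDICT (by name: the statement is the Claim_ definition above) =====
theorem star_rating_distribution_spec : Claim_equal_star_rating_distribution := by
  intro rd _ _
  show _ = _
  simp only [star_rating_distribution, star_rating_distribution_alt, pv_fold rd 0 0 0 0 0]
  have hr : PySem.List.pyRange 1 6 1 = [1, 2, 3, 4, 5] := by decide
  rw [hr]
  simp
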